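-- pv_equiv track=rewrite | github.com/LeJoPat/Cremona-diagram | cremona.py | voisins
-- ===== SOURCE A (Python) =====
-- Liaisons=[(0,1),(1,2),(2,3),(3,4),(4,5),(5,6),(6,7),(7,8),(8,9),(9,10),(11,12),(12,13),(13,14),(14,15),(15,16),(16,17),(17,18),(18,19),(19,20),(0,11),(11,1),(1,12),(12,2),(2,13),(13,3),(3,14),(14,4),(4,15),(15,5),(5,16),(16,6),(6,17),(17,7),(7,18),(18,8),(8,19),(19,9),(9,20),(20,10)]
--
-- def voisins(point):
--     L=[]
--     for k in Liaisons:
--         x,y=k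
--         if x==point:
--             L.append(y)
--         elif y==point:
--             L.append(x)
--     return L
-- ===== SOURCE B (Python) =====
-- Liaisons=[(0,1),(1,2),(2,3),(3,4),(4,5),(5,6),(6,7),(7,8),(8,9),(9,10),(11,12),(12,13),(13,14),(14,15),(15,16),(16,17),(17,18),(18,19),(19,20),(0,11),(11,1),(1,12),(12,2),(2,13),(13,3),(3,14),(14,4),(4,15),(15,5),(5,16),(16,6),(6,17),(17,7),(7,18),(18,8),(8,19),(19,9),(9,20),(20,10)]
--
-- # Adjacency of the fixed Cremona diagram, written out once (order = edge order in Liaisons).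
-- _ADJ = {
--     0: [1, 11], 1: [0, 2, 11, 12], 2: [1, 3, 12, 13], 3: [2, 4, 13, 14],
--     4: [3, 5, 14, 15], 5: [4, 6, 15, 16], 6: [5, 7, 16, 17], 7: [6, 8, 17, 18],
--     8: [7, 9, 18, 19], 9: [8, 10, 19, 20], 10: [9, 20], 11: [12, 0, 1],
--     12: [11, 13, 1, 2], 13: [12, 14, 2, 3], 14: [13, 15, 3, 4], 15: [14, 16, 4, 5],
--     16: [15, 17, 5, 6], 17: [16, 18, 6, 7], 18: [17, 19, 7, 8], 19: [18, 20, 8, 9],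
--     20: [19, 9, 10],
-- }
--
-- def voisins(point):
--     return list(_ADJ.get(point, []))
-- ===== Notes on version B (the rewrite author's own statement) =====
-- stated objective: faster
-- what changed: B replaces A's per-call scan over the full Liaisons edge list by a literal precomputed adjacency table (the graph is a fixed module constant), so voisins is a single dict lookup returning a fresh copy.
import Mathlib
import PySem

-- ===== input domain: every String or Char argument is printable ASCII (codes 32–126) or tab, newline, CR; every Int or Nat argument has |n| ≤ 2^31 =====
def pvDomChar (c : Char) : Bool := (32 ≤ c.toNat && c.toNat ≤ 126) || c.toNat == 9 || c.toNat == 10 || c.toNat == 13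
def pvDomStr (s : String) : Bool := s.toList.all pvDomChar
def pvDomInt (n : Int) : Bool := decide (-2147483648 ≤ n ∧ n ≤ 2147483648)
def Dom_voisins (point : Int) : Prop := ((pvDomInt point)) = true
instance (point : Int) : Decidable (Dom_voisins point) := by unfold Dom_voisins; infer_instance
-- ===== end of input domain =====

-- B replaces A's per-call scan of the fixed edge list by a literal precomputed adjacency table and one lookup.

-- ===== PORT A =====
def Liaisons : List (Int × Int) :=
  [(0,1),(1,2),(2,3),(3,4),(4,5),(5,6),(6,7),(7,8),(8,9),(9,10),(11,12),(12,13),(13,14),(14,15),(15,16),(16,17),(17,18),(18,19),(19,20),(0,11),(11,1),(1,12),(12,2),(2,13),(13,3),(3,14),(14,4),(4,15),(15,5),(5,16),(16,6),(6,17),(17,7),(7,18),(18,8),(8,19),(19,9),(9,20),(20,10)]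

def voisins (point : Int) : List Int :=
  Liaisons.foldl (fun L k =>
    let (x, y) := k
    if x = point then L ++ [y]
    else if y = point then L ++ [x]
    else L) []

-- ===== PORT B =====
-- literal adjacency dict of Source B (insertion-ordered association list, as PySem.Dict)
def ADJ : PySem.Dict Int (List Int) :=
  ⟨[(0, [1, 11]), (1, [0, 2, 11, 12]), (2, [1, 3, 12, 13]), (3, [2, 4, 13, 14]),
    (4, [3, 5, 14, 15]), (5, [4, 6, 15, 16]), (6, [5, 7, 16, 17]), (7, [6, 8, 17, 18]),
    (8, [7, 9, 18, 19]), (9, [8, 10, 19, 20]), (10, [9, 20]), (11, [12, 0, 1]),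
    (12, [11, 13, 1, 2]), (13, [12, 14, 2, 3]), (14, [13, 15, 3, 4]), (15, [14, 16, 4, 5]),
    (16, [15, 17, 5, 6]), (17, [16, 18, 6, 7]), (18, [17, 19, 7, 8]), (19, [18, 20, 8, 9]),
    (20, [19, 9, 10])]⟩

def voisins_alt (point : Int) : List Int :=
  ADJ.getD point []

-- ===== PRECONDITION & SPEC =====
def Spec_voisins (point : Int) (out : List Int) : Prop := out = voisins_alt point
instance (point : Int) (out : List Int) : Decidable (Spec_voisins point out) := by unfold Spec_voisins; infer_instance

-- ===== CLAIM =====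
def Claim_equal_voisins : Prop := ∀ (point : Int), Dom_voisins point → Spec_voisins point (voisins point)

-- ===== LEMMAS AND PROOFS =====
theorem voisins_out (point : Int) (h : ¬ (0 ≤ point ∧ point ≤ 20)) :
    voisins point = voisins_alt point := by
  have h0 : point ≠ 0 := by omega
  have h1 : point ≠ 1 := by omega
  have h2 : point ≠ 2 := by omega
  have h3 : point ≠ 3 := by omega
  have h4 : point ≠ 4 := by omega
  have h5 : point ≠ 5 := by omega
  have h6 : point ≠ 6 := by omega
  have h7 : point ≠ 7 := by omega
  have h8 : point ≠ 8 := by omega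
  have h9 : point ≠ 9 := by omega
  have h10 : point ≠ 10 := by omega
  have h11 : point ≠ 11 := by omega
  have h12 : point ≠ 12 := by omega
  have h13 : point ≠ 13 := by omega
  have h14 : point ≠ 14 := by omega
  have h15 : point ≠ 15 := by omega
  have h16 : point ≠ 16 := by omega
  have h17 : point ≠ 17 := by omega
  have h18 : point ≠ 18 := by omega
  have h19 : point ≠ 19 := by omega
  have h20 : point ≠ 20 := by omega
  simp [voisins, voisins_alt, ADJ, Liaisons, List.foldl, PySem.Dict.getD, PySem.Dict.get?,
    h0, h1, h2, h3, h4, h5, h6, h7, h8, h9, h10, h11, h12, h13, h14, h15, h16, h17, h18, h19, h20,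
    Ne.symm h0, Ne.symm h1, Ne.symm h2, Ne.symm h3, Ne.symm h4, Ne.symm h5, Ne.symm h6,
    Ne.symm h7, Ne.symm h8, Ne.symm h9, Ne.symm h10, Ne.symm h11, Ne.symm h12, Ne.symm h13,
    Ne.symm h14, Ne.symm h15, Ne.symm h16, Ne.symm h17, Ne.symm h18, Ne.symm h19, Ne.symm h20]

-- ===== VERDICT =====
theorem voisins_spec : Claim_equal_voisins := by
  intro point _
  unfold Spec_voisins
  by_cases h : 0 ≤ point ∧ point ≤ 20
  · obtain ⟨h1, h2⟩ := h
    interval_cases point <;> decide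
  · exact voisins_out point h
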